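-- pv_equiv track=rewrite | github.com/angelaxu76/TaobaoProj | helper/excel/download_images_from_excel.py | guess_ext
-- ===== SOURCE A (Python) =====
-- def guess_ext(url: str, content_type: str = "") -> str:
--     """从 URL 或 Content-Type 推断图片扩展名，默认 .jpg。"""
--     url_path = url.split("?")[0].lower()
--     for ext in (".jpg", ".jpeg", ".png", ".webp", ".gif"):
--         if url_path.endswith(ext):
--             return ".jpg" if ext == ".jpeg" else ext
--     if "png" in content_type:
--         return ".png"
--     if "webp" in content_type:
--         return ".webp"
--     return ".jpg"
-- ===== SOURCE B (Python) =====
-- def guess_ext(url: str, content_type: str = "") -> str: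
--     """Single forward character scan: accumulate the lowercased segment after the
--     most recent dot (stopping at '?'), then decide from that segment."""
--     seg = None  # None until a '.' is seen in the pre-'?' part
--     for ch in url:
--         if ch == "?":
--             break
--         if ch == ".":
--             seg = []
--         elif seg is not None:
--             seg.append(ch.lower())
--     ext = "".join(seg) if seg is not None else ""
--     if ext == "jpg" or ext == "jpeg":
--         return ".jpg"
--     if ext == "png":
--         return ".png"
--     if ext == "webp":
--         return ".webp"
--     if ext == "gif":
--         return ".gif"
--     if "png" in content_type:
--         return ".png"
--     if "webp" in content_type:
--         return ".webp"
--     return ".jpg"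
-- ===== Notes on version B (the rewrite author's own statement) =====
-- stated objective: alternative
-- what changed: A splits at the query separator, lowercases the whole path and runs five endswith suffix scans; B makes one forward character scan over the URL with an accumulator (reset at every dot, stop at the query separator, lowercasing char by char) and decides from the accumulated last-dot segment.
import Mathlib
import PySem

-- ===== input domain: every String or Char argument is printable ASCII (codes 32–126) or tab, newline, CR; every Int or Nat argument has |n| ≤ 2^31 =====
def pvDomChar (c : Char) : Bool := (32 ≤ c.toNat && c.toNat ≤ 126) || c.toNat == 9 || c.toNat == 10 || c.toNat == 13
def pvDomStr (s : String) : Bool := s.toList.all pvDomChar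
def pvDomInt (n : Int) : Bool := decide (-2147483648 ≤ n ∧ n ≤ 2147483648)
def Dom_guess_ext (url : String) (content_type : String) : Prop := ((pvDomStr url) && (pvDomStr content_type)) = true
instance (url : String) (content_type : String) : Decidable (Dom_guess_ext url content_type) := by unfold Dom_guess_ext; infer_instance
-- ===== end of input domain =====

-- B replaces A's split/lower/five-endswith pipeline by one forward character scan that
-- accumulates the lowercased segment after the most recent dot (objective: alternative; same cost).

-- ===== PORT A =====
-- the for-loop over the literal 5-tuple of extensions: first matching endswith returns (none = loop fell through)
def guessExtLoop (path : String) : List String → Option String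
  | [] => none
  | e :: rest =>
      if PySem.Str.endswith path e then some (if e = ".jpeg" then ".jpg" else e)
      else guessExtLoop path rest

def guess_ext (url : String) (content_type : String) : String :=
  -- url.split("?")[0].lower(); sep "?" ≠ "" so split? is some, and Python split never returns [] so [0] exists
  let url_path := PySem.Str.lower (((PySem.Str.split? url "?").getD []).headD "")
  (guessExtLoop url_path [".jpg", ".jpeg", ".png", ".webp", ".gif"]).getD
    (if PySem.Str.isIn "png" content_type then ".png"
     else if PySem.Str.isIn "webp" content_type then ".webp" else ".jpg")

-- ===== PORT B =====
-- the for-loop of Source B: seg is None until a '.' is seen; reset at '.', break at '?',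
-- otherwise append the lowercased char (ch.lower() ported as Chars.lowerChar, exact on ASCII)
def scanSeg : List Char → Option (List Char) → Option (List Char)
  | [], seg => seg
  | c :: rest, seg =>
      if c = '?' then seg
      else if c = '.' then scanSeg rest (some [])
      else scanSeg rest (seg.map (· ++ [PySem.Chars.lowerChar c]))

def guess_ext_alt (url : String) (content_type : String) : String :=
  let ext : List Char := (scanSeg url.toList none).getD []
  if ext = "jpg".toList ∨ ext = "jpeg".toList then ".jpg"
  else if ext = "png".toList then ".png"
  else if ext = "webp".toList then ".webp"
  else if ext = "gif".toList then ".gif"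
  else if PySem.Str.isIn "png" content_type then ".png"
  else if PySem.Str.isIn "webp" content_type then ".webp"
  else ".jpg"

-- ===== PRECONDITION & SPEC =====
def Spec_guess_ext (url : String) (content_type : String) (out : String) : Prop := out = guess_ext_alt url content_type
instance (url : String) (content_type : String) (out : String) : Decidable (Spec_guess_ext url content_type out) := by unfold Spec_guess_ext; infer_instance

-- ===== CLAIM (what is proved, stated in full; the proofs are below) =====
def Claim_equal_guess_ext : Prop := ∀ (url : String) (content_type : String), Dom_guess_ext url content_type → Spec_guess_ext url content_type (guess_ext url content_type)

-- ===== LEMMAS AND PROOFS =====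

-- lowering a character neither creates nor destroys a dot
lemma lowerChar_eq_dot (c : Char) : PySem.Chars.lowerChar c = '.' ↔ c = '.' := by
  unfold PySem.Chars.lowerChar PySem.Chars.isupper
  split_ifs with h
  · simp only [Bool.and_eq_true, decide_eq_true_eq] at h
    obtain ⟨h1, h2⟩ := h
    have hA : 65 ≤ c.toNat := h1
    have hZ : c.toNat ≤ 90 := h2
    constructor
    · intro he
      have hv : (c.toNat + 32).isValidChar := Or.inl (by omega)
      have ht : (Char.ofNat (c.toNat + 32)).toNat = c.toNat + 32 := by
        rw [Char.toNat_ofNat, if_pos hv]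
      rw [he] at ht
      have h46 : ('.' : Char).toNat = 46 := rfl
      omega
    · intro he; subst he; exact absurd hA (by decide)
  · exact Iff.rfl
lemma lower_takeWhile_dot (l : List Char) :
    (PySem.Chars.lower l).takeWhile (· ≠ '.') = PySem.Chars.lower (l.takeWhile (· ≠ '.')) := by
  unfold PySem.Chars.lower
  rw [List.takeWhile_map]
  have hp : ((fun x => decide (x ≠ '.')) ∘ PySem.Chars.lowerChar) = (fun x : Char => decide (x ≠ '.')) := by
    funext c; simp [lowerChar_eq_dot]
  rw [hp]
lemma dot_mem_lower (l : List Char) : '.' ∈ PySem.Chars.lower l ↔ '.' ∈ l := by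
  unfold PySem.Chars.lower
  simp only [List.mem_map]
  constructor
  · rintro ⟨a, ha, he⟩; rwa [(lowerChar_eq_dot a).mp he] at ha
  · intro h; exact ⟨'.', h, (lowerChar_eq_dot '.').mpr rfl⟩

lemma go_acc (sep : List Char) (fuel : Nat) :
    ∀ (l cur : List Char) (acc : List (List Char)),
      PySem.Chars.splitOn.go sep fuel l cur acc =
        acc.reverse ++ PySem.Chars.splitOn.go sep fuel l cur [] := by
  induction fuel with
  | zero => intro l cur acc; simp [PySem.Chars.splitOn.go]
  | succ n ih =>
      intro l cur acc
      cases l with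
      | nil => simp [PySem.Chars.splitOn.go]
      | cons c rest =>
          rw [PySem.Chars.splitOn.go, PySem.Chars.splitOn.go]
          split_ifs with h
          · rw [ih _ _ (cur.reverse :: acc), ih _ _ [cur.reverse]]
            simp
          · exact ih _ _ acc
lemma go_first (fuel : Nat) :
    ∀ (l cur : List Char), l.length < fuel →
      ∃ t, PySem.Chars.splitOn.go ['?'] fuel l cur [] =
        (cur.reverse ++ l.takeWhile (· ≠ '?')) :: t := by
  induction fuel with
  | zero => intro l cur h; omega
  | succ n ih =>
      intro l cur h
      cases l with
      | nil => exact ⟨[], by simp [PySem.Chars.splitOn.go]⟩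
      | cons c rest =>
          rw [PySem.Chars.splitOn.go]
          by_cases hc : c = '?'
          · subst hc
            rw [if_pos (by simp [List.isPrefixOf])]
            rw [go_acc]
            exact ⟨PySem.Chars.splitOn.go ['?'] n (List.drop 1 ('?' :: rest)) [] [], by simp⟩
          · rw [if_neg (by simp [List.isPrefixOf]; exact fun he => hc he.symm)]
            obtain ⟨t, ht⟩ := ih rest (c :: cur) (by simp at h ⊢; omega)
            exact ⟨t, by rw [ht]; simp [hc]⟩

lemma path_toList (url : String) :
    (PySem.Str.lower (((PySem.Str.split? url "?").getD []).headD "")).toList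
      = PySem.Chars.lower (url.toList.takeWhile (· ≠ '?')) := by
  rw [PySem.Str.toList_lower]
  congr 1
  obtain ⟨t, ht⟩ := go_first (url.toList.length + 1) url.toList [] (by omega)
  simp only [PySem.Str.split?, PySem.Chars.split?, PySem.Chars.splitOn]
  have : ("?" : String).toList = ['?'] := rfl
  rw [this, ht]
  simp

lemma takeWhile_len_ne (q : Char → Bool) (p : List Char) (hm : '.' ∈ p) (hq : q '.' = false) :
    ¬ (List.takeWhile q p).length = p.length := by
  intro hlen
  have heq := (List.takeWhile_prefix (l := p) q).eq_of_length hlen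
  have := List.mem_takeWhile_imp (heq ▸ hm)
  rw [hq] at this
  exact Bool.false_ne_true this

lemma scanSeg_eq (s : List Char) : ∀ seg0 : Option (List Char),
    scanSeg s seg0 =
      (if '.' ∈ s.takeWhile (· ≠ '?') then
        some (PySem.Chars.lower (((s.takeWhile (· ≠ '?')).reverse.takeWhile (· ≠ '.')).reverse))
      else seg0.map (· ++ PySem.Chars.lower (s.takeWhile (· ≠ '?')))) := by
  induction s with
  | nil =>
      intro seg0
      simp only [scanSeg, List.takeWhile_nil, List.not_mem_nil, if_false]
      cases seg0 <;> simp [PySem.Chars.lower]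
  | cons c rest ih =>
      intro seg0
      by_cases hq : c = '?'
      · subst hq
        simp only [scanSeg]
        rw [if_pos trivial]
        simp only [List.takeWhile_cons]
        simp only [ne_eq, not_true_eq_false, decide_false, Bool.false_eq_true, if_false,
          List.not_mem_nil]
        cases seg0 <;> simp [PySem.Chars.lower]
      · by_cases hd : c = '.'
        · subst hd
          simp only [scanSeg]
          rw [if_neg hq, if_pos trivial]
          rw [ih (some [])]
          have htw : List.takeWhile (fun x => decide (x ≠ '?')) ('.' :: rest)
              = '.' :: List.takeWhile (fun x => decide (x ≠ '?')) rest := by simp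
          rw [htw]
          set p := List.takeWhile (fun x => decide (x ≠ '?')) rest with hp
          rw [if_pos (List.mem_cons_self)]
          by_cases hm : '.' ∈ p
          · rw [if_pos hm]
            congr 2
            rw [List.reverse_cons, List.takeWhile_append, if_neg]
            intro hlen
            exact takeWhile_len_ne (fun x => decide (x ≠ '.')) p.reverse (by simpa using hm) (by decide) (by simpa using hlen)
          · rw [if_neg hm]
            have hself : List.takeWhile (fun x => decide (x ≠ '.')) p.reverse = p.reverse :=
              List.takeWhile_eq_self_iff.mpr (by
                intro a ha
                simp only [decide_eq_true_eq]
                intro he; subst he; exact hm (by simpa using ha))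
            rw [List.reverse_cons, List.takeWhile_append, if_pos (by rw [hself]),
                List.takeWhile_cons]
            simp [PySem.Chars.lower]
        · simp only [scanSeg, if_neg hq, if_neg hd]
          rw [ih (seg0.map (· ++ [PySem.Chars.lowerChar c]))]
          have htw : List.takeWhile (fun x => decide (x ≠ '?')) (c :: rest)
              = c :: List.takeWhile (fun x => decide (x ≠ '?')) rest := by simp [hq]
          rw [htw]
          set p := List.takeWhile (fun x => decide (x ≠ '?')) rest with hp
          have hmem : '.' ∈ c :: p ↔ '.' ∈ p := by simp [Ne.symm hd]
          by_cases hm : '.' ∈ p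
          · rw [if_pos hm, if_pos (hmem.mpr hm)]
            congr 2
            rw [List.reverse_cons, List.takeWhile_append, if_neg]
            intro hlen
            exact takeWhile_len_ne (fun x => decide (x ≠ '.')) p.reverse (by simpa using hm) (by decide) (by simpa using hlen)
          · rw [if_neg hm, if_neg (fun h => hm (hmem.mp h))]
            have hlp : PySem.Chars.lower (c :: p) = PySem.Chars.lowerChar c :: PySem.Chars.lower p := rfl
            rw [hlp, Option.map_map]
            cases seg0 <;> simp

-- a dot-free block v followed by '.' is a prefix of rs iff rs contains a '.' and its dot-free head is exactly v
lemma prefix_dot_iff (v : List Char) (hv : ∀ c ∈ v, c ≠ '.') (rs : List Char) :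
    (v ++ ['.']) <+: rs ↔ ('.' ∈ rs ∧ rs.takeWhile (· ≠ '.') = v) := by
  induction v generalizing rs with
  | nil =>
      cases rs with
      | nil => simp
      | cons c rest =>
          by_cases hc : c = '.'
          · subst hc; simp
          · simp [hc, List.cons_prefix_cons, Ne.symm hc]
  | cons a v' ih =>
      have ha : a ≠ '.' := hv a (by simp)
      have hv' : ∀ c ∈ v', c ≠ '.' := fun c hc => hv c (by simp [hc])
      cases rs with
      | nil => simp
      | cons c rest =>
          by_cases hc : c = '.'
          · subst hc
            simp only [List.cons_append, List.cons_prefix_cons, List.takeWhile_cons]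
            simp [ha]
          · simp only [List.cons_append, List.cons_prefix_cons, List.takeWhile_cons, ih hv' rest]
            simp [hc, Ne.symm hc]
            tauto

-- endswith path e in terms of the reversed path, for e = '.' ++ dot-free w (v = e.toList.reverse minus the final dot)
lemma endswith_dot_iff (path : String) (e : String) (v : List Char)
    (he : e.toList.reverse = v ++ ['.']) (hv : ∀ c ∈ v, c ≠ '.') :
    PySem.Str.endswith path e = true ↔
      ('.' ∈ path.toList.reverse ∧ path.toList.reverse.takeWhile (· ≠ '.') = v) := by
  rw [PySem.Str.endswith_eq, PySem.Chars.endswith_iff, ← prefix_dot_iff v hv, ← he,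
      ← List.reverse_suffix]
  simp

-- ===== VERDICT (by name: the statement is the Claim_ definition above) =====
set_option maxRecDepth 8192 in
theorem guess_ext_spec : Claim_equal_guess_ext := by
  intro url ct _
  show guess_ext url ct = guess_ext_alt url ct
  simp only [guess_ext, guess_ext_alt]
  rw [scanSeg_eq url.toList none]
  set p := url.toList.takeWhile (· ≠ '?') with hp
  set path := PySem.Str.lower (((PySem.Str.split? url "?").getD []).headD "") with hpathdef
  have hpl : path.toList = PySem.Chars.lower p := path_toList url
  set s0 := p.reverse.takeWhile (· ≠ '.') with hs0
  have hrev : path.toList.reverse = PySem.Chars.lower p.reverse := by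
    rw [hpl]; simp [PySem.Chars.lower]
  have hmemr : ('.' ∈ path.toList.reverse) ↔ '.' ∈ p := by
    rw [hrev, dot_mem_lower, List.mem_reverse]
  have htwr : path.toList.reverse.takeWhile (· ≠ '.') = PySem.Chars.lower s0 := by
    rw [hrev, lower_takeWhile_dot]
  have hjpg := endswith_dot_iff path ".jpg" ['g','p','j'] (by decide) (by simp)
  have hjpeg := endswith_dot_iff path ".jpeg" ['g','e','p','j'] (by decide) (by simp)
  have hpng := endswith_dot_iff path ".png" ['g','n','p'] (by decide) (by simp)
  have hwebp := endswith_dot_iff path ".webp" ['p','b','e','w'] (by decide) (by simp)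
  have hgif := endswith_dot_iff path ".gif" ['f','i','g'] (by decide) (by simp)
  rw [hmemr, htwr] at hjpg hjpeg hpng hwebp hgif
  by_cases hd : '.' ∈ p
  · rw [if_pos hd]
    have hextrev : PySem.Chars.lower s0.reverse = (PySem.Chars.lower s0).reverse := by
      simp [PySem.Chars.lower]
    rw [hextrev]
    simp only [Option.getD_some]
    by_cases h1 : PySem.Chars.lower s0 = ['g','p','j']
    · have b1 : PySem.Str.endswith path ".jpg" = true := hjpg.mpr ⟨hd, h1⟩
      rw [h1]
      simp only [guessExtLoop, b1, if_true, Option.getD_some]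
      rw [if_pos (Or.inl (by decide))]
      decide
    · by_cases h2 : PySem.Chars.lower s0 = ['g','e','p','j']
      · have b1 : PySem.Str.endswith path ".jpg" = false :=
          Bool.eq_false_iff.mpr (fun h => h1 (hjpg.mp h).2)
        have b2 : PySem.Str.endswith path ".jpeg" = true := hjpeg.mpr ⟨hd, h2⟩
        rw [h2]
        simp only [guessExtLoop, b1, b2, Bool.false_eq_true, if_false, if_true, Option.getD_some]
        rw [if_pos (Or.inr (by decide))]
      · by_cases h3 : PySem.Chars.lower s0 = ['g','n','p']
        · have b1 : PySem.Str.endswith path ".jpg" = false :=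
            Bool.eq_false_iff.mpr (fun h => h1 (hjpg.mp h).2)
          have b2 : PySem.Str.endswith path ".jpeg" = false :=
            Bool.eq_false_iff.mpr (fun h => h2 (hjpeg.mp h).2)
          have b3 : PySem.Str.endswith path ".png" = true := hpng.mpr ⟨hd, h3⟩
          rw [h3]
          simp only [guessExtLoop, b1, b2, b3, Bool.false_eq_true, if_false, if_true, Option.getD_some]
          rw [if_neg (show ¬(['g','n','p'].reverse = "jpg".toList ∨ ['g','n','p'].reverse = "jpeg".toList) by decide),
              if_pos (show ['g','n','p'].reverse = "png".toList by decide)]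
          decide
        · by_cases h4 : PySem.Chars.lower s0 = ['p','b','e','w']
          · have b1 : PySem.Str.endswith path ".jpg" = false :=
              Bool.eq_false_iff.mpr (fun h => h1 (hjpg.mp h).2)
            have b2 : PySem.Str.endswith path ".jpeg" = false :=
              Bool.eq_false_iff.mpr (fun h => h2 (hjpeg.mp h).2)
            have b3 : PySem.Str.endswith path ".png" = false :=
              Bool.eq_false_iff.mpr (fun h => h3 (hpng.mp h).2)
            have b4 : PySem.Str.endswith path ".webp" = true := hwebp.mpr ⟨hd, h4⟩
            rw [h4]
            simp only [guessExtLoop, b1, b2, b3, b4, Bool.false_eq_true, if_false, if_true, Option.getD_some]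
            rw [if_neg (show ¬(['p','b','e','w'].reverse = "jpg".toList ∨ ['p','b','e','w'].reverse = "jpeg".toList) by decide),
                if_neg (show ¬['p','b','e','w'].reverse = "png".toList by decide),
                if_pos (show ['p','b','e','w'].reverse = "webp".toList by decide)]
            decide
          · by_cases h5 : PySem.Chars.lower s0 = ['f','i','g']
            · have b1 : PySem.Str.endswith path ".jpg" = false :=
                Bool.eq_false_iff.mpr (fun h => h1 (hjpg.mp h).2)
              have b2 : PySem.Str.endswith path ".jpeg" = false :=
                Bool.eq_false_iff.mpr (fun h => h2 (hjpeg.mp h).2)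
              have b3 : PySem.Str.endswith path ".png" = false :=
                Bool.eq_false_iff.mpr (fun h => h3 (hpng.mp h).2)
              have b4 : PySem.Str.endswith path ".webp" = false :=
                Bool.eq_false_iff.mpr (fun h => h4 (hwebp.mp h).2)
              have b5 : PySem.Str.endswith path ".gif" = true := hgif.mpr ⟨hd, h5⟩
              rw [h5]
              simp only [guessExtLoop, b1, b2, b3, b4, b5, Bool.false_eq_true, if_false, if_true, Option.getD_some]
              rw [if_neg (show ¬(['f','i','g'].reverse = "jpg".toList ∨ ['f','i','g'].reverse = "jpeg".toList) by decide),
                  if_neg (show ¬['f','i','g'].reverse = "png".toList by decide),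
                  if_neg (show ¬['f','i','g'].reverse = "webp".toList by decide),
                  if_pos (show ['f','i','g'].reverse = "gif".toList by decide)]
              decide
            · have b1 : PySem.Str.endswith path ".jpg" = false :=
                Bool.eq_false_iff.mpr (fun h => h1 (hjpg.mp h).2)
              have b2 : PySem.Str.endswith path ".jpeg" = false :=
                Bool.eq_false_iff.mpr (fun h => h2 (hjpeg.mp h).2)
              have b3 : PySem.Str.endswith path ".png" = false :=
                Bool.eq_false_iff.mpr (fun h => h3 (hpng.mp h).2)
              have b4 : PySem.Str.endswith path ".webp" = false :=
                Bool.eq_false_iff.mpr (fun h => h4 (hwebp.mp h).2)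
              have b5 : PySem.Str.endswith path ".gif" = false :=
                Bool.eq_false_iff.mpr (fun h => h5 (hgif.mp h).2)
              have c1 : ¬ ((PySem.Chars.lower s0).reverse = "jpg".toList ∨ (PySem.Chars.lower s0).reverse = "jpeg".toList) := by
                rintro (h | h) <;> rw [List.reverse_eq_iff] at h
                · exact h1 (by simpa using h)
                · exact h2 (by simpa using h)
              have c3 : ¬ (PySem.Chars.lower s0).reverse = "png".toList := by
                intro h; rw [List.reverse_eq_iff] at h; exact h3 (by simpa using h)
              have c4 : ¬ (PySem.Chars.lower s0).reverse = "webp".toList := by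
                intro h; rw [List.reverse_eq_iff] at h; exact h4 (by simpa using h)
              have c5 : ¬ (PySem.Chars.lower s0).reverse = "gif".toList := by
                intro h; rw [List.reverse_eq_iff] at h; exact h5 (by simpa using h)
              simp only [guessExtLoop, b1, b2, b3, b4, b5, Bool.false_eq_true, if_false,
                Option.getD_none, c1, c3, c4, c5]
  · rw [if_neg hd]
    have b1 : PySem.Str.endswith path ".jpg" = false :=
      Bool.eq_false_iff.mpr (fun h => hd (hjpg.mp h).1)
    have b2 : PySem.Str.endswith path ".jpeg" = false :=
      Bool.eq_false_iff.mpr (fun h => hd (hjpeg.mp h).1)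
    have b3 : PySem.Str.endswith path ".png" = false :=
      Bool.eq_false_iff.mpr (fun h => hd (hpng.mp h).1)
    have b4 : PySem.Str.endswith path ".webp" = false :=
      Bool.eq_false_iff.mpr (fun h => hd (hwebp.mp h).1)
    have b5 : PySem.Str.endswith path ".gif" = false :=
      Bool.eq_false_iff.mpr (fun h => hd (hgif.mp h).1)
    simp only [guessExtLoop, b1, b2, b3, b4, b5, Bool.false_eq_true, if_false,
      Option.map_none, Option.getD_none]
    rw [if_neg (show ¬(([] : List Char) = "jpg".toList ∨ ([] : List Char) = "jpeg".toList) by decide),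
        if_neg (show ¬([] : List Char) = "png".toList by decide),
        if_neg (show ¬([] : List Char) = "webp".toList by decide),
        if_neg (show ¬([] : List Char) = "gif".toList by decide)]
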